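-- pv_equiv track=rewrite | github.com/TOHgoto/cuhk-timetable-exporter | cuhk_timetable_export/schedule_html.py | _normalize_day
-- ===== SOURCE A (Python) =====
-- _DAY_MAP = {
--     "mo": "Mon", "mon": "Mon", "monday": "Mon",
--     "tu": "Tue", "tue": "Tue", "tues": "Tue", "tuesday": "Tue",
--     "we": "Wed", "wed": "Wed", "weds": "Wed", "wednesday": "Wed",
--     "th": "Thu", "thu": "Thu", "thur": "Thu", "thurs": "Thu", "thursday": "Thu",
--     "fr": "Fri", "fri": "Fri", "friday": "Fri",
--     "sa": "Sat", "sat": "Sat", "saturday": "Sat",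
--     "su": "Sun", "sun": "Sun", "sunday": "Sun",
-- }
--
-- def _normalize_day(text: str) -> str | None:
--     t = text.strip().lower()
--     if t in _DAY_MAP:
--         return _DAY_MAP[t]
--     for key, val in _DAY_MAP.items():
--         if t.startswith(key):
--             return val
--     return None
-- ===== SOURCE B (Python) =====
-- _PREFIX_MAP = {"mo": "Mon", "tu": "Tue", "we": "Wed", "th": "Thu",
--                "fr": "Fri", "sa": "Sat", "su": "Sun"}
--
-- def _normalize_day(text: str) -> str | None:
--     t = text.strip().lower()
--     return _PREFIX_MAP.get(t[:2])
-- ===== Notes on version B (the rewrite author's own statement) =====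
-- stated objective: simpler
-- what changed: Replaces the exact-match branch plus the ordered startswith scan over the 24-key dict with a single lookup of the 2-letter prefix t[:2] in a 7-entry map; every key group shares one value and starts with its 2-letter prefix, so the scan is redundant.
import Mathlib
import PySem

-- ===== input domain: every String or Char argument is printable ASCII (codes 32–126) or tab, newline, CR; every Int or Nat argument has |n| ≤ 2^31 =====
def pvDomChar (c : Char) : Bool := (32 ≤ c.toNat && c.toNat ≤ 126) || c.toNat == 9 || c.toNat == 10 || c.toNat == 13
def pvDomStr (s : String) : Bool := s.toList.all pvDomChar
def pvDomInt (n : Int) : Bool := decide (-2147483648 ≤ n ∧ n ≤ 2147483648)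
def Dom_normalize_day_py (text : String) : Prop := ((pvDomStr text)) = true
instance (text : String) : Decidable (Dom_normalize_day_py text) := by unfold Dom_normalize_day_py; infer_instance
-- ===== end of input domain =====

-- B replaces A's exact-match branch + ordered startswith scan over the 24-key dict
-- by one lookup of the 2-letter prefix in a 7-entry map (objective: simpler).

-- ===== PORT A =====
-- the module-level _DAY_MAP, in Python's insertion order
def pvDayItems : List (List Char × String) :=
  [("mo".toList, "Mon"), ("mon".toList, "Mon"), ("monday".toList, "Mon"),
   ("tu".toList, "Tue"), ("tue".toList, "Tue"), ("tues".toList, "Tue"), ("tuesday".toList, "Tue"),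
   ("we".toList, "Wed"), ("wed".toList, "Wed"), ("weds".toList, "Wed"), ("wednesday".toList, "Wed"),
   ("th".toList, "Thu"), ("thu".toList, "Thu"), ("thur".toList, "Thu"), ("thurs".toList, "Thu"), ("thursday".toList, "Thu"),
   ("fr".toList, "Fri"), ("fri".toList, "Fri"), ("friday".toList, "Fri"),
   ("sa".toList, "Sat"), ("sat".toList, "Sat"), ("saturday".toList, "Sat"),
   ("su".toList, "Sun"), ("sun".toList, "Sun"), ("sunday".toList, "Sun")]

def pvDayMap : PySem.Dict (List Char) String := PySem.Dict.mk pvDayItems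

-- the 'for key, val in _DAY_MAP.items(): if t.startswith(key): return val' loop
def pvScan (t : List Char) : List (List Char × String) → Option String
  | [] => none
  | (k, v) :: rest => if PySem.Chars.startswith t k then some v else pvScan t rest

def normalize_day_py (text : String) : Option String :=
  let t := PySem.Chars.lower (PySem.Chars.strip text.toList)
  match pvDayMap.get? t with
  | some v => some v
  | none => pvScan t pvDayMap.items

-- ===== PORT B =====
def pvPrefixMap : PySem.Dict (List Char) String :=
  PySem.Dict.mk [("mo".toList, "Mon"), ("tu".toList, "Tue"), ("we".toList, "Wed"),
                 ("th".toList, "Thu"), ("fr".toList, "Fri"), ("sa".toList, "Sat"),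
                 ("su".toList, "Sun")]

def normalize_day_py_alt (text : String) : Option String :=
  let t := PySem.Chars.lower (PySem.Chars.strip text.toList)
  pvPrefixMap.get? (PySem.Chars.slice t none (some 2))

-- ===== PRECONDITION & SPEC =====
def Spec_normalize_day_py (text : String) (out : Option String) : Prop := out = normalize_day_py_alt text
instance (text : String) (out : Option String) : Decidable (Spec_normalize_day_py text out) := by unfold Spec_normalize_day_py; infer_instance

-- ===== CLAIM (what is proved, stated in full; the proofs are below) =====
def Claim_equal_normalize_day_py : Prop := ∀ (text : String), Dom_normalize_day_py text → Spec_normalize_day_py text (normalize_day_py text)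

-- ===== LEMMAS AND PROOFS =====
-- a 2+-character key whose first two characters differ from (c1, c2) never compares equal
lemma pv_beq2_false {c1 c2 a b : Char} (h : ¬(c1 = a ∧ c2 = b)) (tail rest : List Char) :
    ((a :: b :: tail : List Char) == c1 :: c2 :: rest) = false := by
  simp only [List.cons_beq_cons, Bool.and_eq_false_iff, beq_eq_false_iff_ne, ne_eq]
  tauto

-- …and is never a prefix of c1 :: c2 :: rest either
lemma pv_pref_false {c1 c2 a b : Char} (h : ¬(c1 = a ∧ c2 = b)) (tail rest : List Char) :
    List.isPrefixOf (a :: b :: tail) (c1 :: c2 :: rest) = false := by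
  simp only [List.isPrefixOf, Bool.and_eq_false_iff, beq_eq_false_iff_ne, ne_eq]
  tauto

-- looking up any key in the exhausted literal dict gives none
lemma pv_get?_nil (x : List Char) : (PySem.Dict.mk ([] : List (List Char × String))).get? x = none := rfl

-- both sides depend only on t = lower(strip(text)); they agree for every List Char
set_option maxHeartbeats 1000000 in
theorem pv_core_eq (t : List Char) :
    (match pvDayMap.get? t with
     | some v => some v
     | none => pvScan t pvDayMap.items) =
    pvPrefixMap.get? (PySem.Chars.slice t none (some 2)) := by
  match t with
  | [] => decide
  | [c] =>
      simp [pvDayMap, pvDayItems, pvPrefixMap, pvScan, PySem.Dict.get?,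
            PySem.Chars.startswith, PySem.Chars.slice, PySem.List.slice,
            List.isPrefixOf, List.take]
  | c1 :: c2 :: rest =>
      have hsl : PySem.Chars.slice (c1 :: c2 :: rest) none (some 2) = [c1, c2] := by
        rw [PySem.Chars.slice_eq_listSlice,
            show ((2 : Int) = ((2 : Nat) : Int)) from rfl, PySem.List.slice_to_natCast]
        rfl
      rw [hsl]
      by_cases h1 : c1 = 'm' ∧ c2 = 'o'
      · obtain ⟨rfl, rfl⟩ := h1
        simp [pvDayMap, pvDayItems, pvPrefixMap, pvScan, PySem.Dict.get?_mk_cons,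
              pv_get?_nil, PySem.Chars.startswith, List.isPrefixOf]
        all_goals (split_ifs <;> rfl)
      by_cases h2 : c1 = 't' ∧ c2 = 'u'
      · obtain ⟨rfl, rfl⟩ := h2
        simp [pvDayMap, pvDayItems, pvPrefixMap, pvScan, PySem.Dict.get?_mk_cons,
              pv_get?_nil, PySem.Chars.startswith, List.isPrefixOf]
        all_goals (split_ifs <;> rfl)
      by_cases h3 : c1 = 'w' ∧ c2 = 'e'
      · obtain ⟨rfl, rfl⟩ := h3
        simp [pvDayMap, pvDayItems, pvPrefixMap, pvScan, PySem.Dict.get?_mk_cons,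
              pv_get?_nil, PySem.Chars.startswith, List.isPrefixOf]
        all_goals (split_ifs <;> rfl)
      by_cases h4 : c1 = 't' ∧ c2 = 'h'
      · obtain ⟨rfl, rfl⟩ := h4
        simp [pvDayMap, pvDayItems, pvPrefixMap, pvScan, PySem.Dict.get?_mk_cons,
              pv_get?_nil, PySem.Chars.startswith, List.isPrefixOf]
        all_goals (split_ifs <;> rfl)
      by_cases h5 : c1 = 'f' ∧ c2 = 'r'
      · obtain ⟨rfl, rfl⟩ := h5
        simp [pvDayMap, pvDayItems, pvPrefixMap, pvScan, PySem.Dict.get?_mk_cons,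
              pv_get?_nil, PySem.Chars.startswith, List.isPrefixOf]
        all_goals (split_ifs <;> rfl)
      by_cases h6 : c1 = 's' ∧ c2 = 'a'
      · obtain ⟨rfl, rfl⟩ := h6
        simp [pvDayMap, pvDayItems, pvPrefixMap, pvScan, PySem.Dict.get?_mk_cons,
              pv_get?_nil, PySem.Chars.startswith, List.isPrefixOf]
        all_goals (split_ifs <;> rfl)
      by_cases h7 : c1 = 's' ∧ c2 = 'u'
      · obtain ⟨rfl, rfl⟩ := h7
        simp [pvDayMap, pvDayItems, pvPrefixMap, pvScan, PySem.Dict.get?_mk_cons,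
              pv_get?_nil, PySem.Chars.startswith, List.isPrefixOf]
        all_goals (split_ifs <;> rfl)
      · simp [pvDayMap, pvDayItems, pvPrefixMap, pvScan,
              PySem.Dict.get?, PySem.Chars.startswith,
              pv_beq2_false h1, pv_beq2_false h2, pv_beq2_false h3, pv_beq2_false h4,
              pv_beq2_false h5, pv_beq2_false h6, pv_beq2_false h7,
              pv_pref_false h1, pv_pref_false h2, pv_pref_false h3, pv_pref_false h4,
              pv_pref_false h5, pv_pref_false h6, pv_pref_false h7]

-- ===== VERDICT (by name: the statement is the Claim_ definition above) =====
theorem normalize_day_py_spec : Claim_equal_normalize_day_py := by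
  intro text _
  unfold Spec_normalize_day_py normalize_day_py normalize_day_py_alt
  exact pv_core_eq _
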